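-- pv_equiv track=rewrite | github.com/ERR0R404504/TA-naderi-pro | پروژه ساختمان های  گسسته .py | symmetric_closure
-- ===== SOURCE A (Python) =====
-- def floyd_warshall(matrix):
--     n = len(matrix)
--     """
--     این تابع  الگوریتم فلوید وارشال را برای محاسبه کوتاه ترین مسیرها بین تمام جفت ریوس در نموداری که با یک ماتریس مجاور  نمایش داده میشود پیاده سازی میکند.
--     """
--     distance = [[matrix[i][j] for j in range(n)] for i in range(n)]
--
--     #محاسبه کوتاه ترین راه با استفاده از با الگوریتک وارشال
--     for k in range(n):
--         for i in range(n):
--             for j in range(n):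
--                 distance[i][j] = distance[i][j] or (distance[i][k] and distance[k][j])
--     return distance
--
-- def symmetric_closure(matrix):
--     n = len(matrix)
--
--     # محاسبه بستار متقارن ماتریکس با استفاده ار الگوریتم وارشال
--     distance = floyd_warshall(matrix)
--     for i in range (n):
--         for j in range(n):
--             if distance[i][j] or distance[j][i]:
--                 matrix[i][j] = 1
--                 matrix[j][i] = 1
--     return matrix
-- ===== SOURCE B (Python) =====
-- # B: per-source frontier/level reachability iteration (with early exit) instead of
-- # the in-place triple-loop Floyd-Warshall; mutates `matrix` in place like A and returns it.
-- def symmetric_closure(matrix):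
--     n = len(matrix)
--
--     def step(cur):
--         return [cur[v] or any(cur[u] and matrix[u][v] for u in range(n)) for v in range(n)]
--
--     reach = []
--     for i in range(n):
--         cur = [bool(matrix[i][j]) for j in range(n)]
--         for _ in range(n):
--             nw = step(cur)
--             if nw == cur:
--                 break
--             cur = nw
--         reach.append(cur)
--
--     for i in range(n):
--         for j in range(n):
--             if reach[i][j] or reach[j][i]:
--                 matrix[i][j] = 1
--                 matrix[j][i] = 1
--     return matrix
-- ===== Notes on version B (the rewrite author's own statement) =====
-- stated objective: faster
-- what changed: Replaces the in-place triple-loop Floyd-Warshall transitive closure with a per-source frontier/level reachability iteration that exits early once reachability stabilizes, then the same symmetric write-back; Pre_ excludes ragged matrices (some row shorter than len(matrix)), on which A raises IndexError (B raises too).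
import Mathlib
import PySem

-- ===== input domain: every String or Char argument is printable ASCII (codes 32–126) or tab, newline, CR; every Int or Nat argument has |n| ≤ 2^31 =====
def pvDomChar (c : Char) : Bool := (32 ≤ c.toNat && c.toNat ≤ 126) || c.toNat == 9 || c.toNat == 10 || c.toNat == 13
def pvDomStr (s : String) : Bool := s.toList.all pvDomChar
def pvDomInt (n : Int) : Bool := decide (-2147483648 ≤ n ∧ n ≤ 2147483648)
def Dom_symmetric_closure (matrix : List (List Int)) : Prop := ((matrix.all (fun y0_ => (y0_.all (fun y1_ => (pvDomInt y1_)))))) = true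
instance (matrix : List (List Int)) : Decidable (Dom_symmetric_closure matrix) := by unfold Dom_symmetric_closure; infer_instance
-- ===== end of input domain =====

-- B replaces A's in-place triple-loop Floyd–Warshall closure by a per-source frontier/level
-- reachability iteration (repeated neighbour expansion with early exit); the Python versions
-- both mutate `matrix` in place and return it — the theorems here are about the return value.

-- shared indexing helpers (Python's m[i][j] read / write; indices are in range under Pre_)
def pvGet2 (d : List (List Int)) (i j : Nat) : Int := (d.getD i []).getD j 0
def pvSet2 (d : List (List Int)) (i j : Nat) (v : Int) : List (List Int) :=
  d.set i ((d.getD i []).set j v)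

-- ===== PORT A =====
-- Python's `x or y` / `x and y` on ints (value-returning, truthiness = ≠ 0)
def pvOr (x y : Int) : Int := if x ≠ 0 then x else y
def pvAnd (x y : Int) : Int := if x ≠ 0 then y else x

def floyd_warshall (matrix : List (List Int)) : List (List Int) :=
  let n := matrix.length
  let distance := (List.range n).map (fun i => (List.range n).map (fun j => pvGet2 matrix i j))
  (List.range n).foldl (fun d k =>
    (List.range n).foldl (fun d i =>
      (List.range n).foldl (fun d j =>
        pvSet2 d i j (pvOr (pvGet2 d i j) (pvAnd (pvGet2 d i k) (pvGet2 d k j)))) d) d) distance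

def symmetric_closure (matrix : List (List Int)) : List (List Int) :=
  let n := matrix.length
  let distance := floyd_warshall matrix
  (List.range n).foldl (fun m i =>
    (List.range n).foldl (fun m j =>
      if pvGet2 distance i j ≠ 0 ∨ pvGet2 distance j i ≠ 0 then
        pvSet2 (pvSet2 m i j 1) j i 1
      else m) m) matrix

-- ===== PORT B =====
def pvBGet (r : List Bool) (v : Nat) : Bool := r.getD v false

-- one frontier/level expansion: v is reached if it was, or some reached u has an edge to v
def pvStep (matrix : List (List Int)) (n : Nat) (cur : List Bool) : List Bool :=
  (List.range n).map (fun v =>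
    pvBGet cur v || (List.range n).any (fun u => pvBGet cur u && decide (pvGet2 matrix u v ≠ 0)))

-- `for _ in range(t): nw = step(cur); if nw == cur: break; cur = nw`
def pvIter (matrix : List (List Int)) (n : Nat) : Nat → List Bool → List Bool
  | 0, cur => cur
  | t + 1, cur =>
    let nw := pvStep matrix n cur
    if nw = cur then cur else pvIter matrix n t nw

def symmetric_closure_alt (matrix : List (List Int)) : List (List Int) :=
  let n := matrix.length
  let reach := (List.range n).map (fun i =>
    pvIter matrix n n ((List.range n).map (fun j => decide (pvGet2 matrix i j ≠ 0))))
  (List.range n).foldl (fun m i =>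
    (List.range n).foldl (fun m j =>
      if pvBGet (reach.getD i []) j || pvBGet (reach.getD j []) i then
        pvSet2 (pvSet2 m i j 1) j i 1
      else m) m) matrix

-- ===== PRECONDITION & SPEC =====
-- Pre_ excludes ragged matrices (a row shorter than len(matrix)): Python A raises IndexError there.
def Pre_symmetric_closure (matrix : List (List Int)) : Prop :=
  ∀ r ∈ matrix, matrix.length ≤ r.length
instance (matrix : List (List Int)) : Decidable (Pre_symmetric_closure matrix) := by
  unfold Pre_symmetric_closure; infer_instance
def pvWitness_symmetric_closure : List (List Int) := [[0, 1], [1, 0]]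

def Spec_symmetric_closure (matrix : List (List Int)) (out : List (List Int)) : Prop := out = symmetric_closure_alt matrix
instance (matrix : List (List Int)) (out : List (List Int)) : Decidable (Spec_symmetric_closure matrix out) := by unfold Spec_symmetric_closure; infer_instance

-- ===== CLAIM (what is proved, stated in full; the proofs are below) =====
def Claim_equal_symmetric_closure : Prop := ∀ (matrix : List (List Int)), Dom_symmetric_closure matrix → Pre_symmetric_closure matrix → Spec_symmetric_closure matrix (symmetric_closure matrix)

-- ===== LEMMAS AND PROOFS =====

-- the (bounded) edge relation of `matrix`: a truthy entry inside the n×n window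
def pvE (m : List (List Int)) (u v : Nat) : Prop :=
  u < m.length ∧ v < m.length ∧ pvGet2 m u v ≠ 0

-- Warshall reachability: path i → j of length ≥ 1 with intermediates < k
def pvW (m : List (List Int)) : Nat → Nat → Nat → Prop
  | 0, i, j => pvE m i j
  | k + 1, i, j => pvW m k i j ∨ (pvW m k i k ∧ pvW m k k j)

-- level reachability from source i: path i → v of length between 1 and t+1
def pvT (m : List (List Int)) (i : Nat) : Nat → Nat → Prop
  | 0, v => pvE m i v
  | t + 1, v => pvT m i t v ∨ ∃ u, pvT m i t u ∧ pvE m u v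

-- generic induction over `(List.range n).foldl`
theorem pvFoldlRangeInd {α : Type} (n : Nat) (f : α → Nat → α) (Q : Nat → α → Prop)
    (h : ∀ j a, j < n → Q j a → Q (j + 1) (f a j)) :
    ∀ a, Q 0 a → Q n ((List.range n).foldl f a) := by
  have aux : ∀ m, m ≤ n → ∀ a, Q 0 a → Q m ((List.range m).foldl f a) := by
    intro m
    induction m with
    | zero => intro _ a ha; simpa using ha
    | succ m ih =>
      intro hm a ha
      rw [List.range_succ, List.foldl_append]
      exact h m _ (by omega) (ih (by omega) a ha)
  exact aux n le_rfl

theorem pvShapeLen {d : List (List Int)} {n i : Nat} (hs : d.length = n ∧ ∀ r ∈ d, r.length = n)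
    (hi : i < n) : (d.getD i []).length = n := by
  have : i < d.length := by omega
  rw [List.getD_eq_getElem d [] this]
  exact hs.2 _ (List.getElem_mem this)

theorem pvGet2_set2_self {d : List (List Int)} {n i j : Nat} (v : Int)
    (hs : d.length = n ∧ ∀ r ∈ d, r.length = n) (hi : i < n) (hj : j < n) :
    pvGet2 (pvSet2 d i j v) i j = v := by
  have hid : i < d.length := by omega
  have hjr : j < (d.getD i []).length := by rw [pvShapeLen hs hi]; exact hj
  unfold pvGet2 pvSet2
  rw [List.getD_eq_getElem _ [] (by simpa using hid), List.getElem_set_self (by simpa using hid),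
    List.getD_eq_getElem _ 0 (by simpa using hjr), List.getElem_set_self (by simpa using hjr)]

theorem pvGet2_set2_ne {d : List (List Int)} {i j a b : Nat} (v : Int)
    (h : ¬(a = i ∧ b = j)) : pvGet2 (pvSet2 d i j v) a b = pvGet2 d a b := by
  unfold pvGet2 pvSet2
  by_cases hid : i < d.length
  · by_cases hai : a = i
    · subst hai
      have hbj : b ≠ j := fun hb => h ⟨rfl, hb⟩
      rw [List.getD_eq_getElem _ [] (by simpa using hid), List.getElem_set_self (by simpa using hid),
        List.getD_eq_getElem d [] hid]
      by_cases hbr : b < (d[a]).length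
      · rw [List.getD_eq_getElem _ 0 (by simpa using hbr), List.getElem_set_ne (by omega),
          List.getD_eq_getElem _ 0 hbr]
      · rw [List.getD_eq_default _ 0 (by simpa using hbr), List.getD_eq_default _ 0 (by omega)]
    · by_cases had : a < d.length
      · rw [List.getD_eq_getElem _ [] (by simpa using had),
          List.getElem_set_ne (fun he => hai he.symm), List.getD_eq_getElem d [] had]
      · rw [List.getD_eq_default _ [] (by simpa using had), List.getD_eq_default d [] (by omega)]
  · rw [List.set_eq_of_length_le (by omega)]

theorem pvShape_set2 {d : List (List Int)} {n : Nat} (i j : Nat) (v : Int)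
    (hs : d.length = n ∧ ∀ r ∈ d, r.length = n) :
    (pvSet2 d i j v).length = n ∧ ∀ r ∈ pvSet2 d i j v, r.length = n := by
  have h1 := hs.1
  by_cases hid : i < d.length
  · constructor
    · simpa [pvSet2] using hs.1
    · intro r hr
      rcases List.mem_or_eq_of_mem_set hr with hmem | heq
      · exact hs.2 _ hmem
      · subst heq
        rw [List.length_set]
        exact pvShapeLen hs (by omega)
  · unfold pvSet2
    rw [List.set_eq_of_length_le (by omega)]
    exact hs

-- truthiness of the Python or/and
theorem pvOr_ne_zero (x y : Int) : pvOr x y ≠ 0 ↔ (x ≠ 0 ∨ y ≠ 0) := by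
  unfold pvOr; split_ifs with h <;> simp [h]

theorem pvAnd_ne_zero (x y : Int) : pvAnd x y ≠ 0 ↔ (x ≠ 0 ∧ y ≠ 0) := by
  unfold pvAnd; split_ifs with h <;> simp [h]

-- basic facts about pvW
theorem pvW_mono_le {m : List (List Int)} {k k' i j : Nat} (hk : k ≤ k') (h : pvW m k i j) :
    pvW m k' i j := by
  induction k' with
  | zero => simpa [Nat.le_zero.mp hk] using h
  | succ k' ih =>
    by_cases hk2 : k = k' + 1
    · simpa [hk2] using h
    · exact Or.inl (ih (by omega))

theorem pvW_fix_col {m : List (List Int)} {k i : Nat} : pvW m (k + 1) i k ↔ pvW m k i k := by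
  show pvW m k i k ∨ (pvW m k i k ∧ pvW m k k k) ↔ _
  tauto

theorem pvW_fix_row {m : List (List Int)} {k j : Nat} : pvW m (k + 1) k j ↔ pvW m k k j := by
  show pvW m k k j ∨ (pvW m k k k ∧ pvW m k k j) ↔ _
  tauto

-- ===== A-side characterisation: the Floyd–Warshall loop computes pvW =====

def pvInv (m d : List (List Int)) (P : Nat → Nat → Prop) : Prop :=
  (d.length = m.length ∧ ∀ r ∈ d, r.length = m.length) ∧
  ∀ a b, a < m.length → b < m.length → (pvGet2 d a b ≠ 0 ↔ P a b)

theorem pvInv_congr {m d : List (List Int)} {P P' : Nat → Nat → Prop}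
    (h : pvInv m d P) (he : ∀ a b, a < m.length → b < m.length → (P a b ↔ P' a b)) :
    pvInv m d P' :=
  ⟨h.1, fun a b ha hb => (h.2 a b ha hb).trans (he a b ha hb)⟩

theorem pvFwInner {m : List (List Int)} {k i : Nat} (hk : k < m.length) (hi : i < m.length)
    (d : List (List Int))
    (hd : pvInv m d (fun a b => if a < i then pvW m (k + 1) a b else pvW m k a b)) :
    pvInv m ((List.range m.length).foldl (fun d j =>
        pvSet2 d i j (pvOr (pvGet2 d i j) (pvAnd (pvGet2 d i k) (pvGet2 d k j)))) d)
      (fun a b => if a < i + 1 then pvW m (k + 1) a b else pvW m k a b) := by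
  have main := pvFoldlRangeInd m.length
    (fun d j => pvSet2 d i j (pvOr (pvGet2 d i j) (pvAnd (pvGet2 d i k) (pvGet2 d k j))))
    (fun j d => pvInv m d
      (fun a b => if a < i ∨ (a = i ∧ b < j) then pvW m (k + 1) a b else pvW m k a b))
    (by
      intro j d hj hinv
      constructor
      · exact pvShape_set2 _ _ _ hinv.1
      · intro a b ha hb
        have hsame : (a < i ∨ (a = i ∧ b < j + 1)) ↔ ((a < i ∨ (a = i ∧ b < j)) ∨ (a = i ∧ b = j)) := by
          constructor
          · rintro (h | ⟨h1, h2⟩)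
            · exact Or.inl (Or.inl h)
            · by_cases hbj : b = j
              · exact Or.inr ⟨h1, hbj⟩
              · exact Or.inl (Or.inr ⟨h1, by omega⟩)
          · rintro ((h | ⟨h1, h2⟩) | ⟨h1, h2⟩)
            · exact Or.inl h
            · exact Or.inr ⟨h1, by omega⟩
            · exact Or.inr ⟨h1, by omega⟩
        by_cases hab : a = i ∧ b = j
        · obtain ⟨rfl, rfl⟩ := hab
          rw [pvGet2_set2_self _ hinv.1 hi hj]
          beta_reduce
          rw [if_pos (hsame.mpr (Or.inr ⟨rfl, rfl⟩))]
          have h1 : pvGet2 d a b ≠ 0 ↔ pvW m k a b := by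
            have h := hinv.2 a b ha hb
            beta_reduce at h
            rw [if_neg (by rintro (h' | ⟨-, h'⟩) <;> omega)] at h
            exact h
          have h2 : pvGet2 d a k ≠ 0 ↔ pvW m k a k := by
            have h := hinv.2 a k ha hk
            beta_reduce at h
            by_cases hc : k < b
            · rw [if_pos (Or.inr ⟨rfl, hc⟩)] at h
              rw [h]
              exact pvW_fix_col
            · rw [if_neg (by rintro (h' | ⟨-, h'⟩) <;> omega)] at h
              exact h
          have h3 : pvGet2 d k b ≠ 0 ↔ pvW m k k b := by
            have h := hinv.2 k b hk hb
            beta_reduce at h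
            by_cases hc : k < a
            · rw [if_pos (Or.inl hc)] at h
              rw [h]
              exact pvW_fix_row
            · rw [if_neg (by rintro (h' | ⟨h', h''⟩) <;> omega)] at h
              exact h
          rw [pvOr_ne_zero, pvAnd_ne_zero, h1, h2, h3]
          exact Iff.rfl
        · rw [pvGet2_set2_ne _ hab]
          have h := hinv.2 a b ha hb
          beta_reduce at h ⊢
          have hsame2 : (a < i ∨ (a = i ∧ b < j + 1)) ↔ (a < i ∨ (a = i ∧ b < j)) := by
            rw [hsame]
            constructor
            · rintro (h' | h')
              · exact h'
              · exact absurd h' hab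
            · exact Or.inl
          by_cases hc : a < i ∨ (a = i ∧ b < j)
          · rw [if_pos hc] at h
            rw [if_pos (hsame2.mpr hc)]
            exact h
          · rw [if_neg hc] at h
            rw [if_neg (fun hx => hc (hsame2.mp hx))]
            exact h)
    d
    (by
      refine pvInv_congr hd ?_
      intro a b _ _
      beta_reduce
      simp only [Nat.not_lt_zero, and_false, or_false])
  refine pvInv_congr main ?_
  intro a b _ hb
  beta_reduce
  by_cases hc : a < i + 1
  · have hc2 : a < i ∨ (a = i ∧ b < m.length) := by
      by_cases h : a < i
      · exact Or.inl h
      · exact Or.inr ⟨by omega, hb⟩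
    rw [if_pos hc2, if_pos hc]
  · rw [if_neg (by rintro (h | ⟨h, -⟩) <;> omega), if_neg hc]

theorem pvFwChar (m : List (List Int)) :
    pvInv m (floyd_warshall m) (pvW m m.length) := by
  unfold floyd_warshall
  have init : pvInv m ((List.range m.length).map (fun i =>
      (List.range m.length).map (fun j => pvGet2 m i j))) (pvW m 0) := by
    constructor
    · constructor
      · simp
      · intro r hr
        rw [List.mem_map] at hr
        obtain ⟨i, _, rfl⟩ := hr
        simp
    · intro a b ha hb
      unfold pvGet2
      rw [PySem.List.getD_map_range _ _ _ _ ha, PySem.List.getD_map_range _ _ _ _ hb]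
      show pvGet2 m a b ≠ 0 ↔ pvE m a b
      unfold pvE
      tauto
  have outer := pvFoldlRangeInd m.length
    (fun d k => (List.range m.length).foldl (fun d i => (List.range m.length).foldl (fun d j =>
        pvSet2 d i j (pvOr (pvGet2 d i j) (pvAnd (pvGet2 d i k) (pvGet2 d k j)))) d) d)
    (fun k d => pvInv m d (pvW m k))
    (by
      intro k d hkn hinv
      have mid := pvFoldlRangeInd m.length
        (fun d i => (List.range m.length).foldl (fun d j =>
            pvSet2 d i j (pvOr (pvGet2 d i j) (pvAnd (pvGet2 d i k) (pvGet2 d k j)))) d)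
        (fun i d => pvInv m d (fun a b => if a < i then pvW m (k + 1) a b else pvW m k a b))
        (by
          intro i d hin hinv2
          exact pvFwInner hkn hin d hinv2)
        d
        (by
          refine pvInv_congr hinv ?_
          intro a b _ _
          simp)
      refine pvInv_congr mid ?_
      intro a b ha _
      simp [ha])
    _ init
  exact outer

-- ===== B-side characterisation: the level iteration computes pvT =====

theorem pvIter_eq_iterate (m : List (List Int)) (n : Nat) :
    ∀ t cur, pvIter m n t cur = (pvStep m n)^[t] cur := by
  intro t
  induction t with
  | zero => intro cur; rfl
  | succ t ih =>
    intro cur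
    show (if pvStep m n cur = cur then cur else pvIter m n t (pvStep m n cur)) = _
    rw [Function.iterate_succ_apply]
    by_cases h : pvStep m n cur = cur
    · rw [if_pos h, h, Function.iterate_fixed h]
    · rw [if_neg h, ih]

theorem pvBGet_step {m : List (List Int)} {n v : Nat} (cur : List Bool) (hv : v < n) :
    pvBGet (pvStep m n cur) v =
      (pvBGet cur v || (List.range n).any (fun u => pvBGet cur u && decide (pvGet2 m u v ≠ 0))) := by
  unfold pvStep pvBGet
  rw [PySem.List.getD_map_range _ _ _ _ hv]

theorem pvStep_length (m : List (List Int)) (n : Nat) (cur : List Bool) :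
    (pvStep m n cur).length = n := by simp [pvStep]

theorem pvIterateChar {m : List (List Int)} (i : Nat) (hi : i < m.length) :
    ∀ t v, v < m.length →
      (pvBGet ((pvStep m m.length)^[t]
        ((List.range m.length).map (fun j => decide (pvGet2 m i j ≠ 0)))) v = true ↔
        pvT m i t v) := by
  intro t
  induction t with
  | zero =>
    intro v hv
    show pvBGet ((List.range m.length).map (fun j => decide (pvGet2 m i j ≠ 0))) v = true ↔ _
    unfold pvBGet
    rw [PySem.List.getD_map_range _ _ _ _ hv, decide_eq_true_eq]
    show pvGet2 m i v ≠ 0 ↔ pvT m i 0 v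
    simp only [pvT, pvE]
    tauto
  | succ t ih =>
    intro v hv
    rw [Function.iterate_succ_apply', pvBGet_step _ hv]
    show _ ↔ pvT m i t v ∨ ∃ u, pvT m i t u ∧ pvE m u v
    rw [Bool.or_eq_true, List.any_eq_true]
    constructor
    · rintro (h | ⟨u, hu, hh⟩)
      · exact Or.inl ((ih v hv).mp h)
      · rw [List.mem_range] at hu
        rw [Bool.and_eq_true, decide_eq_true_eq] at hh
        exact Or.inr ⟨u, (ih u hu).mp hh.1, ⟨hu, hv, hh.2⟩⟩
    · rintro (h | ⟨u, hu, he⟩)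
      · exact Or.inl ((ih v hv).mpr h)
      · refine Or.inr ⟨u, List.mem_range.mpr he.1, ?_⟩
        rw [Bool.and_eq_true, decide_eq_true_eq]
        exact ⟨(ih u he.1).mpr hu, he.2.2⟩

-- monotone saturation of the level iteration within n steps
theorem pvCountMono : ∀ (l1 l2 : List Bool), l1.length = l2.length →
    (∀ idx, l1.getD idx false = true → l2.getD idx false = true) →
    l1.count true ≤ l2.count true := by
  intro l1
  induction l1 with
  | nil => intro l2 _ _; simp
  | cons a l ih =>
    intro l2 hlen hpt
    cases l2 with
    | nil => simp at hlen
    | cons b l' =>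
      have htail : l.count true ≤ l'.count true := by
        refine ih l' (by simpa using hlen) ?_
        intro idx h
        have := hpt (idx + 1)
        simpa using this (by simpa using h)
      have hhead : a = true → b = true := by
        intro ha
        have := hpt 0
        simpa [ha] using this
      cases a <;> cases b <;> simp_all <;> omega

theorem pvCountStrict : ∀ (l1 l2 : List Bool), l1.length = l2.length →
    (∀ idx, l1.getD idx false = true → l2.getD idx false = true) →
    l1 ≠ l2 → l1.count true < l2.count true := by
  intro l1
  induction l1 with
  | nil =>
    intro l2 hlen _ hne
    cases l2 with
    | nil => exact absurd rfl hne
    | cons b l' => simp at hlen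
  | cons a l ih =>
    intro l2 hlen hpt hne
    cases l2 with
    | nil => simp at hlen
    | cons b l' =>
      have hpt' : ∀ idx, l.getD idx false = true → l'.getD idx false = true := by
        intro idx h
        have := hpt (idx + 1)
        simpa using this (by simpa using h)
      have hlen' : l.length = l'.length := by simpa using hlen
      have hhead : a = true → b = true := by
        intro ha
        have := hpt 0
        simpa [ha] using this
      by_cases hab : a = b
      · subst hab
        have hcnt := ih l' hlen' hpt' (fun h => hne (by rw [h]))
        cases a <;> simp [List.count_cons] <;> omega
      · have hfb : a = false ∧ b = true := by
          cases a <;> cases b <;> simp_all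
        obtain ⟨ha2, hb2⟩ := hfb
        subst ha2; subst hb2
        have := pvCountMono l l' hlen' hpt'
        simp [List.count_cons]
        omega

theorem pvStep_pointwise {m : List (List Int)} {n : Nat} (cur : List Bool) (hlen : cur.length = n) :
    ∀ idx, cur.getD idx false = true → (pvStep m n cur).getD idx false = true := by
  intro idx h
  have hidx : idx < n := by
    by_contra hx
    rw [List.getD_eq_default _ _ (by omega)] at h
    exact Bool.false_ne_true h
  have := pvBGet_step (m := m) cur hidx
  unfold pvBGet at this
  rw [this, h]
  simp

theorem pvSaturate (m : List (List Int)) (n : Nat) (cur₀ : List Bool) (hlen : cur₀.length = n) :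
    (pvStep m n)^[n] cur₀ = (pvStep m n)^[n + 1] cur₀ := by
  have hlent : ∀ t, ((pvStep m n)^[t] cur₀).length = n := by
    intro t
    cases t with
    | zero => exact hlen
    | succ t => rw [Function.iterate_succ_apply']; exact pvStep_length m n _
  have key : ∀ t, (pvStep m n)^[t] cur₀ = (pvStep m n)^[t + 1] cur₀ ∨
      t ≤ ((pvStep m n)^[t] cur₀).count true := by
    intro t
    induction t with
    | zero => exact Or.inr (Nat.zero_le _)
    | succ t ih =>
      by_cases h : (pvStep m n)^[t] cur₀ = (pvStep m n)^[t + 1] cur₀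
      · left
        rw [Function.iterate_succ_apply', Function.iterate_succ_apply', ← h]
      · right
        have hcnt : t ≤ ((pvStep m n)^[t] cur₀).count true := by
          rcases ih with h' | h'
          · exact absurd h' h
          · exact h'
        have hstrict : ((pvStep m n)^[t] cur₀).count true <
            ((pvStep m n)^[t + 1] cur₀).count true := by
          refine pvCountStrict _ _ (by rw [hlent, hlent]) ?_ h
          rw [Function.iterate_succ_apply']
          exact pvStep_pointwise _ (hlent t)
        omega
  rcases key n with h | h
  · exact h
  · have hle : ((pvStep m n)^[n] cur₀).count true ≤ n := by
      calc ((pvStep m n)^[n] cur₀).count true ≤ ((pvStep m n)^[n] cur₀).length :=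
            List.count_le_length
        _ = n := hlent n
    have hall : ∀ b ∈ (pvStep m n)^[n] cur₀, true = b := by
      rw [← List.count_eq_length]
      have := hlent n
      omega
    refine List.ext_getElem (by rw [hlent, hlent]) ?_
    intro idx h1 h2
    have hv1 : ((pvStep m n)^[n] cur₀)[idx] = true :=
      (hall _ (List.getElem_mem h1)).symm
    have hidx : idx < n := by rw [hlent n] at h1; exact h1
    have hv2 : ((pvStep m n)^[n + 1] cur₀).getD idx false = true := by
      rw [Function.iterate_succ_apply']
      refine pvStep_pointwise _ (hlent n) idx ?_
      rw [List.getD_eq_getElem _ _ h1, hv1]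
    rw [hv1, ← List.getD_eq_getElem _ false h2, hv2]

-- ===== both characterisations meet in TransGen =====

theorem pvT_mono_le {m : List (List Int)} {i t t' v : Nat} (h : t ≤ t') (ht : pvT m i t v) :
    pvT m i t' v := by
  induction t' with
  | zero => simpa [Nat.le_zero.mp h] using ht
  | succ t' ih =>
    by_cases h2 : t = t' + 1
    · simpa [h2] using ht
    · exact Or.inl (ih (by omega))

theorem pvT_toTrans {m : List (List Int)} {i : Nat} :
    ∀ t v, pvT m i t v → Relation.TransGen (pvE m) i v := by
  intro t
  induction t with
  | zero => intro v h; exact Relation.TransGen.single h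
  | succ t ih =>
    intro v h
    rcases h with h | ⟨u, hu, he⟩
    · exact ih v h
    · exact Relation.TransGen.tail (ih u hu) he

theorem pvTransGen_toT {m : List (List Int)} {i v : Nat} (hi : i < m.length)
    (h : Relation.TransGen (pvE m) i v) : pvT m i m.length v := by
  induction h with
  | single h => exact pvT_mono_le (Nat.zero_le _) h
  | tail hab he ih =>
    rename_i b c
    have hTn1 : pvT m i (m.length + 1) c := Or.inr ⟨b, ih, he⟩
    have hc : c < m.length := he.2.1
    -- collapse one level via saturation of the iteration
    have hs := pvSaturate m m.length
      ((List.range m.length).map (fun j => decide (pvGet2 m i j ≠ 0))) (by simp)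
    have h1 := pvIterateChar i hi (m.length + 1) c hc
    have h2 := pvIterateChar i hi m.length c hc
    rw [← hs] at h1
    exact h2.mp (h1.mpr hTn1)

theorem pvW_toTrans {m : List (List Int)} :
    ∀ k i j, pvW m k i j → Relation.TransGen (pvE m) i j := by
  intro k
  induction k with
  | zero => intro i j h; exact Relation.TransGen.single h
  | succ k ih =>
    intro i j h
    rcases h with h | ⟨h1, h2⟩
    · exact ih i j h
    · exact (ih i k h1).trans (ih k j h2)

theorem pvW_tail {m : List (List Int)} (j : Nat) :
    ∀ k i u, u < k → pvW m k i u → pvE m u j → pvW m k i j := by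
  intro k
  induction k with
  | zero => intro i u hu; omega
  | succ k ih =>
    intro i u hu hw he
    have hEW : pvE m u j → pvW m k u j := fun h => pvW_mono_le (Nat.zero_le _) h
    rcases hw with h1 | ⟨h1, h2⟩
    · by_cases hc : u < k
      · exact Or.inl (ih i u hc h1 he)
      · have huk : u = k := by omega
        subst huk
        exact Or.inr ⟨h1, hEW he⟩
    · by_cases hc : u < k
      · exact Or.inr ⟨h1, ih k u hc h2 he⟩
      · have huk : u = k := by omega
        subst huk
        exact Or.inr ⟨h1, hEW he⟩

theorem pvTransGen_toW {m : List (List Int)} {i j : Nat}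
    (h : Relation.TransGen (pvE m) i j) : pvW m m.length i j := by
  induction h with
  | single h => exact pvW_mono_le (Nat.zero_le _) h
  | tail hab he ih =>
    exact pvW_tail _ m.length _ _ he.1 ih he

theorem pvW_iff_T {m : List (List Int)} {i j : Nat} (hi : i < m.length) :
    (pvW m m.length i j ↔ pvT m i m.length j) :=
  ⟨fun h => pvTransGen_toT hi (pvW_toTrans _ _ _ h),
   fun h => pvTransGen_toW (pvT_toTrans _ _ h)⟩

-- the two write-back conditions agree inside the n×n window
theorem pvCondEq (m : List (List Int)) {i j : Nat} (hi : i < m.length) (hj : j < m.length) :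
    ((pvGet2 (floyd_warshall m) i j ≠ 0 ∨ pvGet2 (floyd_warshall m) j i ≠ 0) ↔
      (pvBGet (((List.range m.length).map (fun i =>
          pvIter m m.length m.length
            ((List.range m.length).map (fun j => decide (pvGet2 m i j ≠ 0))))).getD i []) j ||
        pvBGet (((List.range m.length).map (fun i =>
          pvIter m m.length m.length
            ((List.range m.length).map (fun j => decide (pvGet2 m i j ≠ 0))))).getD j []) i) = true) := by
  have hreach : ∀ a b, a < m.length → b < m.length →
      (pvBGet (((List.range m.length).map (fun i =>
          pvIter m m.length m.length
            ((List.range m.length).map (fun j => decide (pvGet2 m i j ≠ 0))))).getD a []) b = true ↔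
        pvW m m.length a b) := by
    intro a b ha hb
    rw [PySem.List.getD_map_range _ _ _ _ ha, pvIter_eq_iterate]
    rw [pvIterateChar a ha m.length b hb]
    exact (pvW_iff_T ha).symm
  have hdist := pvFwChar m
  rw [Bool.or_eq_true, hreach i j hi hj, hreach j i hj hi,
    hdist.2 i j hi hj, hdist.2 j i hj hi]

theorem pvWriteCongr {α : Type} (n : Nat) (f : Nat → Nat → α → α)
    (c1 c2 : Nat → Nat → Prop) [∀ i j, Decidable (c1 i j)] [∀ i j, Decidable (c2 i j)]
    (h : ∀ i j, i < n → j < n → (c1 i j ↔ c2 i j)) (m0 : α) :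
    (List.range n).foldl (fun m i => (List.range n).foldl
        (fun m j => if c1 i j then f i j m else m) m) m0 =
    (List.range n).foldl (fun m i => (List.range n).foldl
        (fun m j => if c2 i j then f i j m else m) m) m0 := by
  refine PySem.List.foldl_congr_mem _ _ _ _ ?_
  intro acc i hi
  refine PySem.List.foldl_congr_mem _ _ _ _ ?_
  intro acc' j hj
  rw [List.mem_range] at hi hj
  exact if_congr (h i j hi hj) rfl rfl

-- ===== VERDICT (by name: the statement is the Claim_ definition above) =====
theorem symmetric_closure_spec : Claim_equal_symmetric_closure := by
  intro matrix _ _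
  show symmetric_closure matrix = symmetric_closure_alt matrix
  unfold symmetric_closure symmetric_closure_alt
  exact pvWriteCongr matrix.length (fun i j m => pvSet2 (pvSet2 m i j 1) j i 1) _ _
    (fun i j hi hj => pvCondEq matrix hi hj) matrix
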